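-- pv_equiv track=rewrite | github.com/S33B007/CSE-231---Intro-to-Programming | Week 5 - Functions pt2/Chapter Exercises/Is number in range.py | range_test
-- ===== SOURCE A (Python) =====
-- def range_test(num):
--     count = 0
--     for i in range(2,555,1):
--         while count < i:
--             if i == num:
--                 return True
--             else:
--                 count += 1
-- ===== SOURCE B (Python) =====
-- def range_test(num):
--     # Closed-form membership test: range.__contains__ is O(1) arithmetic for ints.
--     return True if num in range(2, 555) else None
-- ===== Notes on version B (the rewrite author's own statement) =====
-- stated objective: simpler
-- what changed: Replaced the nested for/while counter scan with a single closed-form range-membership test (True if num in range(2,555) else None).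
import Mathlib
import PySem

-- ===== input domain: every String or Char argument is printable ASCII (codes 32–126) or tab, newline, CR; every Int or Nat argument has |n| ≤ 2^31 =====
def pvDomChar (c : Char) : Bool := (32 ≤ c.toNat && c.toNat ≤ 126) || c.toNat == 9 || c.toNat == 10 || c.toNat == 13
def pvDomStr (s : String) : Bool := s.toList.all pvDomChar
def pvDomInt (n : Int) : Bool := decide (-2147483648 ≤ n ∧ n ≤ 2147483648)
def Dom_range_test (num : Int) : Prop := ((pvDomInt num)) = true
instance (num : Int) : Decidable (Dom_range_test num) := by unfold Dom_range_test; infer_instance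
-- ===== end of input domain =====

-- B replaces A's nested for/while counter scan with a single closed-form range-membership test (objective: simpler).


-- ===== PORT A =====
-- inner 'while count < i: if i == num: return True else: count += 1';
-- fuel (i - count).toNat is exactly the number of iterations the loop can make.
-- 'none' result = early 'return True'; 'some c' = loop finished with count = c.
def rtWhile (num i : Int) (count : Int) (fuel : Nat) : Option Int :=
  match fuel with
  | 0 => some count
  | fuel + 1 =>
    if count < i then
      if i = num then none
      else rtWhile num i (count + 1) fuel
    else some count

-- outer 'for i in range(2,555,1)' carrying the counter state
def rtGo (num : Int) : List Int → Int → Option Bool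
  | [], _ => none                       -- fell off the function: Python returns None
  | i :: rest, count =>
    match rtWhile num i count (i - count).toNat with
    | none => some true                 -- 'return True'
    | some c => rtGo num rest c

def range_test (num : Int) : Option Bool :=
  rtGo num (PySem.List.pyRange 2 555 1) 0

-- ===== PORT B =====
-- 'True if num in range(2, 555) else None': range.__contains__ for an int is this arithmetic test.
def range_test_alt (num : Int) : Option Bool :=
  if 2 ≤ num ∧ num < 555 then some true else none

-- ===== PRECONDITION & SPEC =====
def Spec_range_test (num : Int) (out : Option Bool) : Prop := out = range_test_alt num
instance (num : Int) (out : Option Bool) : Decidable (Spec_range_test num out) := by unfold Spec_range_test; infer_instance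

-- ===== CLAIM (what is proved, stated in full; the proofs are below) =====
def Claim_equal_range_test : Prop := ∀ (num : Int), Dom_range_test num → Spec_range_test num (range_test num)

-- ===== LEMMAS AND PROOFS =====
theorem rtWhile_spec (num i : Int) :
    ∀ (fuel : Nat) (count : Int), count < i → count + fuel = i →
      rtWhile num i count fuel = if i = num then none else some i := by
  intro fuel
  induction fuel with
  | zero => intro count h1 h2; omega
  | succ f ih =>
    intro count h1 h2
    unfold rtWhile
    rw [if_pos h1]
    by_cases hn : i = num
    · simp [hn]
    · rw [if_neg hn, if_neg hn]
      by_cases hlt : count + 1 < i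
      · rw [ih (count + 1) hlt (by omega), if_neg hn]
      · have : f = 0 := by omega
        subst this
        have he : count + 1 = i := by omega
        subst he
        unfold rtWhile
        rfl

theorem rtGo_spec (num : Int) :
    ∀ (k : Nat) (a count : Int), a + k = 555 → 2 ≤ a → count < a →
      rtGo num (PySem.List.pyRange a 555 1) count =
        if a ≤ num ∧ num < 555 then some true else none := by
  intro k
  induction k with
  | zero =>
    intro a count ha _ _
    have : a = 555 := by omega
    subst this
    simp [rtGo]
  | succ k ih =>
    intro a count ha h2 hc
    rw [PySem.List.pyRange_one_cons (by omega)]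
    unfold rtGo
    rw [rtWhile_spec num a (a - count).toNat count hc (by omega)]
    by_cases hn : a = num
    · rw [if_pos hn]
      rw [if_pos ⟨le_of_eq hn, by omega⟩]
    · rw [if_neg hn]
      simp only []
      rw [ih (a + 1) a (by omega) (by omega) (by omega)]
      by_cases hle : a + 1 ≤ num ∧ num < 555
      · rw [if_pos hle, if_pos ⟨by omega, hle.2⟩]
      · rw [if_neg hle, if_neg (by omega)]

-- ===== VERDICT (by name: the statement is the Claim_ definition above) =====
theorem range_test_spec : Claim_equal_range_test := by
  intro num _
  unfold Spec_range_test range_test range_test_alt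
  rw [rtGo_spec num 553 2 0 (by omega) (by omega) (by omega)]
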